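-- pv_equiv track=rewrite | github.com/ZaneZaiontz/FreeTweet | FT/bot/processing/link_conversion.py | add_spoiler
-- ===== SOURCE A (Python) =====
-- SPOILER_GAP: int = 5
--
-- def add_spoiler(links) -> list:
--     """
--         Adds a discord spoiler tag to the given links
--     """
--     new_links = []
--     for index, value in enumerate(links):
--         if index % SPOILER_GAP == 0:
--             new_links.append("|| " + value + " ||")
--         else:
--             new_links.append(value)
--     return new_links
-- ===== SOURCE B (Python) =====
-- SPOILER_GAP: int = 5
--
-- def add_spoiler(links) -> list:
--     """
--         Adds a discord spoiler tag to the given links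
--     """
--     new_links = list(links)
--     for i in range(0, len(new_links), SPOILER_GAP):
--         new_links[i] = "|| " + new_links[i] + " ||"
--     return new_links
-- ===== Notes on version B (the rewrite author's own statement) =====
-- stated objective: alternative
-- what changed: B replaces the enumerate-all-elements pass with a modular branch by a copy of the list followed by a strided in-place update that touches only every 5th index via range(0, len, 5).
import Mathlib
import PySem

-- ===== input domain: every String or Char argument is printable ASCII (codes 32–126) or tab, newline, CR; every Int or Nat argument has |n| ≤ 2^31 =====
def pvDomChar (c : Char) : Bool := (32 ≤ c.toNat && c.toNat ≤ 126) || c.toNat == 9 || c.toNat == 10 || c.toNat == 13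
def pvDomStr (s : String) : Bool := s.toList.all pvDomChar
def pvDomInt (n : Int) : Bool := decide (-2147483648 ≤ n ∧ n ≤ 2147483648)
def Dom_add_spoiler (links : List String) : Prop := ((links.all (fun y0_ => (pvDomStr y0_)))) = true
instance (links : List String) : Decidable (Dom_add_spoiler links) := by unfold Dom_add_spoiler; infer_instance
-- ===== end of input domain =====

-- B replaces A's enumerate-all pass (modular branch on each index) by a copy plus a
-- strided in-place update of every 5th position; same cost, different decomposition.

-- ===== PORT A =====
def add_spoiler (links : List String) : List String :=
  (PySem.List.enumerate links).foldl
    (fun new_links p =>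
      if PySem.Int.mod p.1 5 = 0 then new_links ++ ["|| " ++ p.2 ++ " ||"]
      else new_links ++ [p.2]) []

-- ===== PORT B =====
def add_spoiler_alt (links : List String) : List String :=
  (PySem.List.pyRange 0 (links.length : Int) 5).foldl
    (fun new_links i =>
      new_links.set i.toNat ("|| " ++ PySem.List.pyGetD new_links i "" ++ " ||")) links

-- ===== PRECONDITION & SPEC =====
def Spec_add_spoiler (links : List String) (out : List String) : Prop := out = add_spoiler_alt links
instance (links : List String) (out : List String) : Decidable (Spec_add_spoiler links out) := by unfold Spec_add_spoiler; infer_instance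

-- ===== CLAIM (what is proved, stated in full; the proofs are below) =====
def Claim_equal_add_spoiler : Prop := ∀ (links : List String), Dom_add_spoiler links → Spec_add_spoiler links (add_spoiler links)

-- ===== LEMMAS AND PROOFS =====

def pvSpTag (v : String) : String := "|| " ++ v ++ " ||"

theorem pv_A_getElem? (links : List String) (k : Nat) :
    (add_spoiler links)[k]? =
      links[k]?.map (fun v => if PySem.Int.mod (k : Int) 5 = 0 then pvSpTag v else v) := by
  unfold add_spoiler
  have hfun : (fun (acc : List String) (p : Int × String) =>
      if PySem.Int.mod p.1 5 = 0 then acc ++ ["|| " ++ p.2 ++ " ||"] else acc ++ [p.2])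
      = fun acc p => acc ++ [if PySem.Int.mod p.1 5 = 0 then pvSpTag p.2 else p.2] := by
    funext acc p; unfold pvSpTag; split <;> rfl
  rw [hfun, PySem.List.foldl_append_singleton_eq_map, List.nil_append,
    List.getElem?_map, PySem.List.getElem?_enumerate, Option.map_map]
  cases links[k]? <;> simp

theorem pv_B_foldl_getElem? (r : List Int) (acc : List String)
    (hnd : r.Nodup) (hb : ∀ i ∈ r, 0 ≤ i ∧ i < (acc.length : Int)) (k : Nat) :
    (r.foldl (fun nl i => nl.set i.toNat ("|| " ++ PySem.List.pyGetD nl i "" ++ " ||")) acc)[k]?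
      = if (k : Int) ∈ r then acc[k]?.map pvSpTag else acc[k]? := by
  induction r generalizing acc with
  | nil => simp
  | cons i r' ih =>
    obtain ⟨hi0, hilt⟩ := hb i (List.mem_cons_self ..)
    have hitn : (i.toNat : Int) = i := Int.toNat_of_nonneg hi0
    have hitlt : i.toNat < acc.length := by omega
    have hacc' : ∀ j ∈ r', 0 ≤ j ∧ j < ((acc.set i.toNat
        ("|| " ++ PySem.List.pyGetD acc i "" ++ " ||")).length : Int) := by
      intro j hj; simpa using hb j (List.mem_cons_of_mem _ hj)
    rw [List.foldl_cons, ih _ hnd.of_cons hacc']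
    by_cases hk : (k : Int) ∈ r'
    · have hki : i.toNat ≠ k := by
        intro h; subst h; rw [hitn] at hk
        exact (List.nodup_cons.mp hnd).1 hk
      rw [List.getElem?_set_ne hki]
      simp [hk, List.mem_cons]
    · by_cases hik : (k : Int) = i
      · have hkk : i.toNat = k := by omega
        subst hkk
        rw [List.getElem?_set_self hitlt,
          PySem.List.pyGetD_eq_getElem acc "" hi0 (by omega)]
        have : acc[i.toNat]? = some acc[i.toNat] := List.getElem?_eq_getElem hitlt
        rw [hitn] at hk
        simp [hk, this, pvSpTag, hitn]
      · have hki : i.toNat ≠ k := by omega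
        rw [List.getElem?_set_ne hki]
        simp [hk, List.mem_cons, hik]

theorem pv_mem_range5 (n : Int) (k : Nat) :
    (k : Int) ∈ PySem.List.pyRange 0 n 5 ↔ (k : Int) < n ∧ (5 : Int) ∣ (k : Int) := by
  rw [PySem.List.mem_pyRange_iff_of_pos (by norm_num)]
  constructor
  · rintro ⟨_, h1, h2⟩; exact ⟨h1, by simpa using h2⟩
  · rintro ⟨h1, h2⟩; exact ⟨by positivity, h1, by simpa using h2⟩

theorem pv_nodup_range5 (n : Int) : (PySem.List.pyRange 0 n 5).Nodup := by
  rw [PySem.List.pyRange_of_pos 0 n (by norm_num)]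
  exact (List.nodup_range).map (fun a b h => by omega)

-- ===== VERDICT (by name: the statement is the Claim_ definition above) =====
theorem add_spoiler_spec : Claim_equal_add_spoiler := by
  intro links _
  unfold Spec_add_spoiler
  apply List.ext_getElem?
  intro k
  rw [pv_A_getElem?]
  unfold add_spoiler_alt
  rw [pv_B_foldl_getElem? _ _ (pv_nodup_range5 _)
    (by intro i hi
        rw [PySem.List.mem_pyRange_iff_of_pos (by norm_num)] at hi
        exact ⟨hi.1, hi.2.1⟩) k]
  by_cases hk : k < links.length
  · simp only [pv_mem_range5]
    by_cases hd : (5 : Int) ∣ (k : Int)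
    · simp [hd, hk, Int.ofNat_lt.mpr hk]
    · simp [hd]
  · have : links[k]? = none := List.getElem?_eq_none (by omega)
    simp [this]
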